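-- pv_equiv track=rewrite | github.com/thewalkeragency/babyrobots | Desktop/indii-music-babyrobots/scripts/markdown_format_checker.py | check_code_blocks
-- ===== SOURCE A (Python) =====
-- def check_code_blocks(content):
--     """Check code block formatting."""
--     issues = []
--
--     # Count opening and closing code fences
--     fence_count = content.count('```')
--     if fence_count % 2 != 0:
--         issues.append("Unmatched code block fences (``` count is odd)")
--
--     # Check for proper language tags on opening fences only
--     lines = content.split('\n')
--     in_code_block = False
--
--     for i, line in enumerate(lines, 1):
--         if line.strip().startswith('```'):
--             if not in_code_block:
--                 # Opening fence - check for language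
--                 lang = line.strip()[3:].strip()
--                 if not lang:
--                     issues.append(f"Line {i}: Code block without language specification")
--                 in_code_block = True
--             else:
--                 # Closing fence
--                 in_code_block = False
--
--     return issues
-- ===== SOURCE B (Python) =====
-- def _next_fence(lines):
--     """(index, line) of the first fence line, or None."""
--     for k, line in enumerate(lines):
--         if line.strip().startswith('```'):
--             return k, line
--     return None
--
--
-- def _unlabeled(lines, lineno):
--     """Recursively consume fence PAIRS: find the opening fence, check its
--     language tag, find the matching closing fence, recurse on the tail."""
--     opening = _next_fence(lines)
--     if opening is None:
--         return []
--     k, line = opening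
--     issues = []
--     if not line.strip()[3:].strip():
--         issues = [f"Line {lineno + k}: Code block without language specification"]
--     rest = lines[k + 1:]
--     closing = _next_fence(rest)
--     if closing is None:
--         return issues
--     j, _ = closing
--     return issues + _unlabeled(rest[j + 1:], lineno + k + 1 + j + 1)
--
--
-- def check_code_blocks(content):
--     """Check code block formatting."""
--     issues = []
--     if content.count('```') % 2 != 0:
--         issues.append("Unmatched code block fences (``` count is odd)")
--     return issues + _unlabeled(content.split('\n'), 1)
-- ===== Notes on version B (the rewrite author's own statement) =====
-- stated objective: alternative
-- what changed: Replaces the single stateful per-line scan with an in_code_block toggle by a recursive pair-consumer: locate the next opening fence, check its language tag, locate its closing fence, and recurse on the remaining lines.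
import Mathlib
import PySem

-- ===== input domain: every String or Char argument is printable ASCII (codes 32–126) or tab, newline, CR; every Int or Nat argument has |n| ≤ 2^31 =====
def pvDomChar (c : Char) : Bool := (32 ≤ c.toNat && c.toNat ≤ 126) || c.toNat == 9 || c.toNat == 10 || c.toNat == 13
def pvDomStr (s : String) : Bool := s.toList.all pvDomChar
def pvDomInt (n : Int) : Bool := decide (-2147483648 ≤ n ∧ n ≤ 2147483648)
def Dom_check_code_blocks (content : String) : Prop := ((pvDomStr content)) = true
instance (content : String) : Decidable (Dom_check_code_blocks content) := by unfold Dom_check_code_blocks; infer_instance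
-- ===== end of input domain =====

-- B replaces A's stateful per-line toggle scan by a recursive pair-consumer (find the
-- opening fence, check its tag, find its closing fence, recurse); same cost, alternative structure.

-- ===== PORT A =====
-- literal transliteration of A: count fences, then one loop over enumerated lines
-- carrying the state (issues, in_code_block).
def check_code_blocks (content : String) : List String :=
  let issues : List String := []
  let fence_count := PySem.Str.count content "```"
  let issues :=
    if fence_count % 2 ≠ 0 then
      issues ++ ["Unmatched code block fences (``` count is odd)"]
    else issues
  -- content.split('\n'): '\n' is a nonempty separator, so split? always returns some
  let lines := (PySem.Str.split? content "\n").getD []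
  let final :=
    (PySem.List.enumerate lines 1).foldl
      (fun (st : List String × Bool) p =>
        if PySem.Str.startswith (PySem.Str.strip p.2) "```" then
          if !st.2 then
            if PySem.Str.len (PySem.Str.strip (PySem.Str.slice (PySem.Str.strip p.2) (some 3))) = 0 then
              (st.1 ++ ["Line " ++ PySem.Int.toStr p.1 ++ ": Code block without language specification"], true)
            else (st.1, true)
          else (st.1, false)
        else (st.1, st.2))
      (issues, false)
  final.1

-- ===== PORT B =====
-- _next_fence: the for-loop with early return, as the obvious structural recursion
def pvNextFence : List String → Option (Nat × String)
  | [] => none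
  | line :: rest =>
      if PySem.Str.startswith (PySem.Str.strip line) "```" then some (0, line)
      else (pvNextFence rest).map (fun p => (p.1 + 1, p.2))

-- termination helper for pvUnlabeled (cited by its decreasing_by)
theorem pvNextFence_lt (lines : List String) (k : Nat) (l : String)
    (h : pvNextFence lines = some (k, l)) : k < lines.length := by
  induction lines generalizing k l with
  | nil => simp [pvNextFence] at h
  | cons x rest ih =>
    simp only [pvNextFence] at h
    split at h
    · cases h; simp
    · cases hr : pvNextFence rest with
      | none => rw [hr] at h; simp at h
      | some p =>
        rw [hr] at h
        simp only [Option.map_some] at h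
        cases h
        have := ih p.1 p.2 (by rw [hr])
        simp only [List.length_cons]
        omega

-- _unlabeled: recursive pair-consumption
-- lines[k+1:] with a nonnegative bound is List.drop (k+1) (exact)
def pvUnlabeled (lines : List String) (lineno : Int) : List String :=
  match h : pvNextFence lines with
  | none => []
  | some (k, line) =>
      let issues :=
        if PySem.Str.len (PySem.Str.strip (PySem.Str.slice (PySem.Str.strip line) (some 3))) = 0 then
          ["Line " ++ PySem.Int.toStr (lineno + k) ++ ": Code block without language specification"]
        else []
      let rest := lines.drop (k + 1)
      match pvNextFence rest with
      | none => issues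
      | some (j, _) => issues ++ pvUnlabeled (rest.drop (j + 1)) (lineno + k + 1 + j + 1)
termination_by lines.length
decreasing_by
  have hk := pvNextFence_lt lines k line h
  simp [List.length_drop]
  omega

def check_code_blocks_alt (content : String) : List String :=
  let issues : List String :=
    if PySem.Str.count content "```" % 2 ≠ 0 then
      ["Unmatched code block fences (``` count is odd)"]
    else []
  issues ++ pvUnlabeled ((PySem.Str.split? content "\n").getD []) 1

-- ===== PRECONDITION & SPEC =====
def Spec_check_code_blocks (content : String) (out : List String) : Prop := out = check_code_blocks_alt content
instance (content : String) (out : List String) : Decidable (Spec_check_code_blocks content out) := by unfold Spec_check_code_blocks; infer_instance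

-- ===== CLAIM =====
def Claim_equal_check_code_blocks : Prop := ∀ (content : String), Dom_check_code_blocks content → Spec_check_code_blocks content (check_code_blocks content)

-- ===== LEMMAS AND PROOFS =====

-- A-side reading: walk the fence index with A's in_code_block flag b
def pvProc : List (Int × String) → Bool → List String → List String
  | [], _, acc => acc
  | (i, s) :: rest, b, acc =>
      pvProc rest (!b)
        (if b = false ∧ PySem.Str.len (PySem.Str.strip (PySem.Str.slice s (some 3))) = 0 then
          acc ++ ["Line " ++ PySem.Int.toStr i ++ ": Code block without language specification"]
        else acc)

-- the language check on one opening fence (s is the stripped line)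
def pvChk (i : Int) (s : String) : List String :=
  if PySem.Str.len (PySem.Str.strip (PySem.Str.slice s (some 3))) = 0 then
    ["Line " ++ PySem.Int.toStr i ++ ": Code block without language specification"]
  else []

-- pair-consumption over the fence index
def pvProc2 : List (Int × String) → List String
  | [] => []
  | [(i, s)] => pvChk i s
  | (i, s) :: _ :: rest => pvChk i s ++ pvProc2 rest

-- the fence index: (1-based line number, stripped line) of every fence line
def pvFences (lines : List String) (n : Int) : List (Int × String) :=
  (PySem.List.enumerate lines n).filterMap
    (fun p =>
      if PySem.Str.startswith (PySem.Str.strip p.2) "```" then some (p.1, PySem.Str.strip p.2)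
      else none)

-- A's loop equals pvProc over the fence index
theorem pvA_eq_proc (el : List (Int × String)) (acc : List String) (b : Bool) :
    (el.foldl
      (fun (st : List String × Bool) p =>
        if PySem.Str.startswith (PySem.Str.strip p.2) "```" then
          if !st.2 then
            if PySem.Str.len (PySem.Str.strip (PySem.Str.slice (PySem.Str.strip p.2) (some 3))) = 0 then
              (st.1 ++ ["Line " ++ PySem.Int.toStr p.1 ++ ": Code block without language specification"], true)
            else (st.1, true)
          else (st.1, false)
        else (st.1, st.2))
      (acc, b)).1
    = pvProc (el.filterMap
        (fun p =>
          if PySem.Str.startswith (PySem.Str.strip p.2) "```" then some (p.1, PySem.Str.strip p.2)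
          else none)) b acc := by
  induction el generalizing acc b with
  | nil => rfl
  | cons p rest ih =>
    obtain ⟨i, line⟩ := p
    simp only [List.foldl_cons, List.filterMap_cons]
    by_cases hf : PySem.Str.startswith (PySem.Str.strip line) "```" = true
    · simp only [if_pos hf]
      cases b with
      | false =>
        by_cases hl : PySem.Str.len (PySem.Str.strip (PySem.Str.slice (PySem.Str.strip line) (some 3))) = 0
        · rw [if_pos (by rfl), if_pos hl, ih, pvProc, if_pos ⟨rfl, hl⟩]; rfl
        · rw [if_pos (by rfl), if_neg hl, ih, pvProc, if_neg (by rintro ⟨-, h⟩; exact hl h)]; rfl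
      | true =>
        rw [if_neg (by simp), ih, pvProc, if_neg (by rintro ⟨h, -⟩; cases h)]; rfl
    · simp only [if_neg hf]
      rw [ih]

-- pvProc with A's flag false is pair-consumption (flag true skips one entry)
theorem pvProc2_cons (i : Int) (s : String) (rest : List (Int × String)) :
    pvProc2 ((i, s) :: rest) = pvChk i s ++ pvProc2 rest.tail := by
  cases rest <;> simp [pvProc2]

theorem pvProc_split (fl : List (Int × String)) :
    (∀ acc, pvProc fl false acc = acc ++ pvProc2 fl) ∧
    (∀ acc, pvProc fl true acc = acc ++ pvProc2 fl.tail) := by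
  induction fl with
  | nil => constructor <;> intro acc <;> simp [pvProc, pvProc2]
  | cons p rest ih =>
    obtain ⟨i, s⟩ := p
    constructor
    · intro acc
      rw [pvProc]
      simp only [Bool.not_false]
      rw [ih.2, pvProc2_cons]
      by_cases hl : PySem.Str.len (PySem.Str.strip (PySem.Str.slice s (some 3))) = 0
      · rw [if_pos ⟨by trivial, hl⟩, pvChk, if_pos hl]; simp
      · rw [if_neg (by rintro ⟨-, h⟩; exact hl h), pvChk, if_neg hl]; simp
    · intro acc
      rw [pvProc]
      simp only [Bool.not_true]
      rw [if_neg (by rintro ⟨h, -⟩; cases h), ih.1]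
      rfl

-- decomposition of the fence index along _next_fence
theorem pvFences_eq (lines : List String) (n : Int) :
    pvFences lines n =
      match pvNextFence lines with
      | none => []
      | some (k, l) => (n + k, PySem.Str.strip l) :: pvFences (lines.drop (k + 1)) (n + k + 1) := by
  induction lines generalizing n with
  | nil => simp [pvFences, pvNextFence, PySem.List.enumerate]
  | cons x rest ih =>
    by_cases hf : PySem.Str.startswith (PySem.Str.strip x) "```" = true
    · simp only [pvNextFence, if_pos hf]
      simp only [pvFences, PySem.List.enumerate_cons, List.filterMap_cons, if_pos hf]
      simp
    · simp only [pvNextFence, if_neg hf]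
      have hx : pvFences (x :: rest) n = pvFences rest (n + 1) := by
        simp only [pvFences, PySem.List.enumerate_cons, List.filterMap_cons, if_neg hf]
      rw [hx, ih]
      cases hr : pvNextFence rest with
      | none => simp
      | some p =>
        obtain ⟨k, l⟩ := p
        simp only [Option.map_some]
        have hd : List.drop (k + 1 + 1) (x :: rest) = List.drop (k + 1) rest :=
          List.drop_succ_cons
        have h1 : n + 1 + (k : Int) = n + ((k + 1 : Nat) : Int) := by push_cast; ring
        rw [hd, ← h1]

-- B's recursion computes pair-consumption over the fence index
theorem pvUnlabeled_eq (lines : List String) (lineno : Int) :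
    pvUnlabeled lines lineno = pvProc2 (pvFences lines lineno) := by
  induction hn : lines.length using Nat.strong_induction_on generalizing lines lineno with
  | _ n ih =>
  rw [pvUnlabeled, pvFences_eq]
  split
  case _ heq => rw [heq]; rfl
  case _ k line heq =>
    have hk := pvNextFence_lt lines k line heq
    rw [heq, pvProc2_cons]
    dsimp only
    rw [pvFences_eq (List.drop (k + 1) lines)]
    cases h2 : pvNextFence (List.drop (k + 1) lines) with
    | none => simp only [pvChk, List.tail_nil, pvProc2, List.append_nil]
    | some q =>
      obtain ⟨j, l2⟩ := q
      simp only [pvChk, List.tail_cons]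
      rw [ih (List.length (List.drop (j + 1) (List.drop (k + 1) lines)))
          (by subst hn; simp [List.length_drop]; omega) _ _ rfl]

-- ===== VERDICT =====
theorem check_code_blocks_spec : Claim_equal_check_code_blocks := by
  intro content _
  unfold Spec_check_code_blocks check_code_blocks check_code_blocks_alt
  rw [pvA_eq_proc]
  rw [(pvProc_split _).1]
  rw [pvUnlabeled_eq]
  simp only [List.nil_append]
  rfl
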